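-- pv_equiv track=rewrite | github.com/bholeshwar/Linear-Cryptanalysis-on-Logic-Locking | csaw-llc-2019/scripts/onecount.py | onecount
-- ===== SOURCE A (Python) =====
-- def incrementer(xs, b):
--     s = []
--     for i, xi in enumerate(xs):
--         if i == 0:
--             si = xi ^ b
--             ci = xi & b
--         else:
--             si = xi ^ ci
--             ci = xi & ci
--         s.append(si)
--     s.append(ci)
--     return s
--
-- def onecount(xs):
--     assert len(xs) > 0
--     if len(xs) == 1:
--         return xs
--     else:
--         bits_needed = (len(xs)).bit_length()
--         ys = onecount(xs[:-1])
--         zs = incrementer(ys, xs[-1])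
--         return zs[:bits_needed]
-- ===== SOURCE B (Python) =====
-- def onecount(xs):
--     acc = xs[:1]
--     for i in range(1, len(xs)):
--         b = xs[i]
--         c = b
--         s = []
--         for y in acc:
--             s.append(y ^ c)
--             c = y & c
--         s.append(c)
--         acc = s[:(i + 1).bit_length()]
--     return acc
-- ===== Notes on version B (the rewrite author's own statement) =====
-- stated objective: faster
-- what changed: Replaces A's right-recursion (which copies xs[:-1] at every level and recurses n deep) with a single left-to-right loop that threads the ripple-carry accumulator and truncates it to (i+1).bit_length() after each step.
import Mathlib
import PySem

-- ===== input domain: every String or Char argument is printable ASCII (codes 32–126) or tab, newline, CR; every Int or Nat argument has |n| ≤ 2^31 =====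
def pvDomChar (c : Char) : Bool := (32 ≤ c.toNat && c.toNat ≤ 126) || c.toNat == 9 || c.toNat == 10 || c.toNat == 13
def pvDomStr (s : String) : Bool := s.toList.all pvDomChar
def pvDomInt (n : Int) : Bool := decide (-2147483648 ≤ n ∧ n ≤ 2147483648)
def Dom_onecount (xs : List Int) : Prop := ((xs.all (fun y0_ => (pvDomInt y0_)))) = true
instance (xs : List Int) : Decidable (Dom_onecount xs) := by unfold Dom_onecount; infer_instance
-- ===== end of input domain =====

-- B replaces A's right-recursion (which copies xs[:-1] at every level) by one left-to-right
-- loop threading the ripple-carry accumulator: faster (no per-level list copies, no recursion).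

-- ===== PORT A =====
-- carry chain for i >= 1 of incrementer's loop: si = xi ^ ci, ci = xi & ci; appends final ci
def incGo : List Int → Int → List Int
  | [], ci => [ci]
  | x :: t, ci => PySem.Int.bxor x ci :: incGo t (PySem.Int.band x ci)

def incrementer (xs : List Int) (b : Int) : List Int :=
  match xs with
  | [] => []  -- Python raises NameError here (ci unbound); unreachable from onecount
  | x :: t => PySem.Int.bxor x b :: incGo t (PySem.Int.band x b)

def onecount (xs : List Int) : List Int :=
  match h : xs with
  | [] => []  -- assert len(xs) > 0 fails: excluded by Pre_onecount
  | [x] => [x]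
  | _ :: _ :: _ =>
    let bits := PySem.Int.bitLength ((xs.length : Nat) : Int)
    (incrementer (onecount xs.dropLast) (xs.getLast (by simp [h]))).take bits
termination_by xs.length
decreasing_by simp [h]

-- ===== PORT B =====
-- inner loop of B: ripple b into acc with carry c (initially b), append final carry
def rippleB : List Int → Int → List Int
  | [], c => [c]
  | y :: t, c => PySem.Int.bxor y c :: rippleB t (PySem.Int.band y c)

-- one iteration of B's outer loop: state = (acc, i+1); truncate to (i+1).bit_length()
def stepB (p : List Int × Nat) (b : Int) : List Int × Nat :=
  ((rippleB p.1 b).take (PySem.Int.bitLength ((p.2 : Nat) : Int)), p.2 + 1)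

def onecount_alt (xs : List Int) : List Int :=
  match xs with
  | [] => []
  | x :: rest => (rest.foldl stepB ([x], 2)).1

-- ===== PRECONDITION & SPEC =====
-- A asserts len(xs) > 0 and raises AssertionError on []: Pre_ excludes the empty list.
def Pre_onecount (xs : List Int) : Prop := xs ≠ []
instance (xs : List Int) : Decidable (Pre_onecount xs) := by unfold Pre_onecount; infer_instance
def pvWitness_onecount : List Int := ([1, 0, 1])

def Spec_onecount (xs : List Int) (out : List Int) : Prop := out = onecount_alt xs
instance (xs : List Int) (out : List Int) : Decidable (Spec_onecount xs out) := by unfold Spec_onecount; infer_instance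

-- ===== CLAIM (what is proved, stated in full; the proofs are below) =====
def Claim_equal_onecount : Prop := ∀ (xs : List Int), Dom_onecount xs → Pre_onecount xs → Spec_onecount xs (onecount xs)

-- ===== LEMMAS AND PROOFS =====

theorem rippleB_eq_incGo (l : List Int) (c : Int) : rippleB l c = incGo l c := by
  induction l generalizing c with
  | nil => rfl
  | cons x t ih => simp [rippleB, incGo, ih]

theorem incrementer_eq_rippleB (x : Int) (t : List Int) (b : Int) :
    incrementer (x :: t) b = rippleB (x :: t) b := by
  simp [incrementer, rippleB, rippleB_eq_incGo]

theorem rippleB_ne_nil (l : List Int) (c : Int) : rippleB l c ≠ [] := by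
  cases l <;> simp [rippleB]

theorem bitLength_pos (n : Nat) (h : 0 < n) : 0 < PySem.Int.bitLength ((n : Nat) : Int) := by
  rw [PySem.Int.bitLength_of_pos (by exact_mod_cast h)]
  omega

-- unfolding A at length ≥ 2, phrased on ys ++ [b]
theorem onecount_concat (ys : List Int) (h : ys ≠ []) (b : Int) :
    onecount (ys ++ [b]) =
      (incrementer (onecount ys) b).take (PySem.Int.bitLength ((ys.length + 1 : Nat) : Int)) := by
  obtain ⟨a, t, rfl⟩ := List.exists_cons_of_ne_nil h
  rw [onecount.eq_def]
  cases t with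
  | nil => simp
  | cons c t' =>
    have hd : (c :: (t' ++ [b])).dropLast = c :: t' := by
      rw [show c :: (t' ++ [b]) = (c :: t') ++ [b] by simp, List.dropLast_concat]
    have hg : (c :: (t' ++ [b])).getLast (by simp) = b := by
      have h2 := List.getLast_concat (l := c :: t') (a := b)
      simpa using h2
    simp [hd, hg]

theorem foldl_stepB_snd (l : List Int) (acc : List Int) (n : Nat) :
    (l.foldl stepB (acc, n)).2 = n + l.length := by
  induction l generalizing acc n with
  | nil => simp
  | cons x t ih => simp [stepB, ih]; omega

theorem foldl_stepB_ne_nil (l : List Int) (acc : List Int) (n : Nat) (hacc : acc ≠ [])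
    (hn : 2 ≤ n) : (l.foldl stepB (acc, n)).1 ≠ [] := by
  induction l generalizing acc n with
  | nil => simpa
  | cons b t ih =>
    simp only [List.foldl_cons]
    refine ih _ _ ?_ (by omega)
    show (rippleB acc b).take (PySem.Int.bitLength ((n : Nat) : Int)) ≠ []
    obtain ⟨y, l', hy⟩ := List.exists_cons_of_ne_nil (rippleB_ne_nil acc b)
    have hb := bitLength_pos n (by omega)
    rw [hy]
    cases hk : PySem.Int.bitLength ((n : Nat) : Int) with
    | zero => omega
    | succ k => simp

theorem onecount_eq_alt_cons (l : List Int) (x : Int) :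
    onecount (x :: l) = (l.foldl stepB ([x], 2)).1 := by
  induction l using List.reverseRecOn with
  | nil => simp [onecount]
  | append_singleton l b ih =>
    have h1 : x :: (l ++ [b]) = (x :: l) ++ [b] := by simp
    rw [h1, onecount_concat (x :: l) (by simp) b, List.foldl_append, ih]
    have hne : (l.foldl stepB ([x], 2)).1 ≠ [] :=
      foldl_stepB_ne_nil l [x] 2 (by simp) (le_refl 2)
    obtain ⟨y, t, hy⟩ := List.exists_cons_of_ne_nil hne
    have hsnd : (l.foldl stepB ([x], 2)).2 = 2 + l.length := foldl_stepB_snd l [x] 2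
    have hlen : ((x :: l).length + 1 : Nat) = 2 + l.length := by simp only [List.length_cons]; omega
    simp only [List.foldl_cons, List.foldl_nil, stepB, hsnd, hy, incrementer_eq_rippleB, hlen]

-- ===== VERDICT (by name: the statement is the Claim_ definition above) =====
theorem onecount_spec : Claim_equal_onecount := by
  intro xs _ hpre
  obtain ⟨x, l, rfl⟩ := List.exists_cons_of_ne_nil hpre
  show onecount (x :: l) = onecount_alt (x :: l)
  rw [onecount_eq_alt_cons]
  rfl
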